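-- pv_equiv track=rewrite | github.com/Otter2022/PolyPQ | python/PQtarImplementationKmedoids.py | make_subvector_groups
-- ===== SOURCE A (Python) =====
-- def reconstruct_dense_vector(vec_str, grid_size):
--     """
--     Reconstructs a dense binary vector from its sparse representation.
--     The sparse representation is assumed to be a string of space-separated indices
--     where the value is 1. All other positions (0 ... grid_size-1) are 0.
--     """
--     dense_vec = [0] * grid_size
--     if vec_str:
--         for idx in vec_str.split():
--             dense_vec[int(idx)] = 1
--     return dense_vec
--
-- def split_into_subvectors(dense_vec, subvector_size):
--     """
--     Splits a dense vector into subvectors of the given size.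
--     """
--     return [dense_vec[i:i+subvector_size] for i in range(0, len(dense_vec), subvector_size)]
--
-- def make_subvector_groups(sparse_vecs, m, d):
--     """
--     Splits each sparse vector into subvectors and groups them by subspace.
--     Returns a list of m groups, where each group is a list of subvectors.
--     The order of vectors is preserved.
--     """
--     dense_vecs = []
--     for vec_str in sparse_vecs:
--         dense_vec = reconstruct_dense_vector(vec_str, d)
--         dense_vecs.append(dense_vec)
--     subvector_size = len(dense_vecs[0]) // m
--     if len(dense_vecs[0]) % m != 0:
--         raise ValueError("The dense vector length is not divisible by the number of subvectors (m).")
--     subvector_groups = [[] for _ in range(m)]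
--     for vec in dense_vecs:
--         subvectors = split_into_subvectors(vec, subvector_size)
--         for j in range(m):
--             subvector_groups[j].append(subvectors[j])
--     return subvector_groups
-- ===== SOURCE B (Python) =====
-- def make_subvector_groups(sparse_vecs, m, d):
--     """For each sparse vector, scatter every index straight into its subspace slot,
--     then group the subvectors by subspace; the dense vectors are never materialised."""
--     if d % m != 0:
--         raise ValueError("The dense vector length is not divisible by the number of subvectors (m).")
--     sub = d // m
--     per_vec = []
--     for s in sparse_vecs:
--         subs = [[0] * sub for _ in range(m)]
--         for tok in s.split():
--             idx = int(tok)
--             subs[idx // sub][idx % sub] = 1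
--         per_vec.append(subs)
--     return [[subs[j] for subs in per_vec] for j in range(m)]
-- ===== Notes on version B (the rewrite author's own statement) =====
-- stated objective: alternative
-- what changed: B fuses reconstruction and splitting: instead of materialising each dense d-vector and slicing it into m chunks, it scatters every parsed index straight into its subspace cell (idx//sub, idx%sub) and then transposes the per-vector results; Pre_ excludes inputs where either program raises (empty input, m=0, d not divisible by m, d<1, unparsable or out-of-range tokens) and the accidental corner m<0 with a non-empty token, where A's [] comes from range(m) being empty while B's scatter raises.
-- outside the precondition, e.g. on make_subvector_groups(['0 1'], -2, 4): A returns [], B raises IndexError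
import Mathlib
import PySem

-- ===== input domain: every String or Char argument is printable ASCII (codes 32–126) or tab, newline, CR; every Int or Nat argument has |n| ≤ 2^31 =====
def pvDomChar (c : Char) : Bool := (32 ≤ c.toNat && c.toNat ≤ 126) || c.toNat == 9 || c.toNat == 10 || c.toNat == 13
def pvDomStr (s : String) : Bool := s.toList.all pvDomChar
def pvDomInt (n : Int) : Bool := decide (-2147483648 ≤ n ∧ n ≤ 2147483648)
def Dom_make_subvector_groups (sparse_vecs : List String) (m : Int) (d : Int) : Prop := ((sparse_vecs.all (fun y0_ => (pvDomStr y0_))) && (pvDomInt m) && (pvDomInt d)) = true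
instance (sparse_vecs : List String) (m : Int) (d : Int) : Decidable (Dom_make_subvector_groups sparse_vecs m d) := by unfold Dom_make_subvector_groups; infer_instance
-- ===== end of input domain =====

-- B fuses reconstruction and splitting: it scatters each sparse index straight into its
-- subspace slot instead of building every dense vector and slicing it (objective: alternative).

-- ===== PORT A =====
def reconstruct_dense_vector (vec_str : String) (grid_size : Int) : List Int :=
  let dense_vec := List.replicate grid_size.toNat 0
  if vec_str ≠ "" then
    (PySem.Str.split₀ vec_str).foldl
      (fun dv tok => PySem.List.pySetD dv ((PySem.Int.ofStr? tok).getD 0) 1) dense_vec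
  else dense_vec

def split_into_subvectors (dense_vec : List Int) (subvector_size : Int) : List (List Int) :=
  (PySem.List.pyRange 0 (dense_vec.length : Int) subvector_size).map
    (fun i => PySem.List.slice dense_vec (some i) (some (i + subvector_size)))

def make_subvector_groups (sparse_vecs : List String) (m : Int) (d : Int) : List (List (List Int)) :=
  let dense_vecs := sparse_vecs.map (fun vec_str => reconstruct_dense_vector vec_str d)
  let first := PySem.List.pyGetD dense_vecs 0 []
  let subvector_size := PySem.Int.floordiv (first.length : Int) m
  if PySem.Int.mod (first.length : Int) m ≠ 0 then []   -- raise ValueError: outside Pre_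
  else
    let init : List (List (List Int)) := (PySem.List.pyRange 0 m 1).map (fun _ => [])
    dense_vecs.foldl
      (fun groups vec =>
        let subvectors := split_into_subvectors vec subvector_size
        (PySem.List.pyRange 0 m 1).foldl
          (fun g j =>
            PySem.List.pySetD g j
              (PySem.List.pyGetD g j [] ++ [PySem.List.pyGetD subvectors j []]))
          groups)
      init

-- ===== PORT B =====
def make_subvector_groups_alt (sparse_vecs : List String) (m : Int) (d : Int) : List (List (List Int)) :=
  if PySem.Int.mod d m ≠ 0 then []   -- raise ValueError: outside Pre_
  else
    let sub := PySem.Int.floordiv d m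
    let per_vec := sparse_vecs.map (fun s =>
      (PySem.Str.split₀ s).foldl
        (fun subs tok =>
          let idx := (PySem.Int.ofStr? tok).getD 0
          PySem.List.pySetD subs (PySem.Int.floordiv idx sub)
            (PySem.List.pySetD
              (PySem.List.pyGetD subs (PySem.Int.floordiv idx sub) [])
              (PySem.Int.mod idx sub) 1))
        ((PySem.List.pyRange 0 m 1).map (fun _ => List.replicate sub.toNat 0)))
    (PySem.List.pyRange 0 m 1).map (fun j => per_vec.map (fun subs => PySem.List.pyGetD subs j []))

-- ===== PRECONDITION & SPEC =====
-- Pre_ excludes: empty sparse_vecs, m = 0, non-divisible d, d ≤ 0, unparsable or out-of-range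
-- index tokens (A raises IndexError/ValueError/ZeroDivisionError on all of those), and —
-- the one case where A still RETURNS — negative m together with a non-empty token, where A's
-- empty-groups return [] is an accident of range(m) over a negative bound and B's scatter raises.
def Pre_make_subvector_groups (sparse_vecs : List String) (m : Int) (d : Int) : Prop :=
  sparse_vecs ≠ [] ∧ 1 ≤ d ∧ m ∣ d ∧
  ((1 ≤ m ∧ ∀ s ∈ sparse_vecs, ∀ tok ∈ PySem.Str.split₀ s,
      ((PySem.Int.ofStr? tok).any fun i => decide (-d ≤ i ∧ i < d)) = true)
   ∨ (m ≤ -1 ∧ ∀ s ∈ sparse_vecs, PySem.Str.split₀ s = []))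
instance (sparse_vecs : List String) (m : Int) (d : Int) : Decidable (Pre_make_subvector_groups sparse_vecs m d) := by unfold Pre_make_subvector_groups; infer_instance

def pvWitness_make_subvector_groups : List String × Int × Int := (["0 3", "-1"], 2, 4)

def Spec_make_subvector_groups (sparse_vecs : List String) (m : Int) (d : Int) (out : List (List (List Int))) : Prop := out = make_subvector_groups_alt sparse_vecs m d
instance (sparse_vecs : List String) (m : Int) (d : Int) (out : List (List (List Int))) : Decidable (Spec_make_subvector_groups sparse_vecs m d out) := by unfold Spec_make_subvector_groups; infer_instance

-- ===== CLAIM (what is proved, stated in full; the proofs are below) =====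
def Claim_equal_make_subvector_groups : Prop := ∀ (sparse_vecs : List String) (m : Int) (d : Int), Dom_make_subvector_groups sparse_vecs m d → Pre_make_subvector_groups sparse_vecs m d → Spec_make_subvector_groups sparse_vecs m d (make_subvector_groups sparse_vecs m d)


-- ===== LEMMAS AND PROOFS =====

-- proof-side vocabulary: positions written, the dense fold, the chunk view, the scatter step
def pvWrap (d i : Int) : Nat := (PySem.Int.mod i d).toNat

def pvPos (d : Int) (s : String) : List Nat :=
  (PySem.Str.split₀ s).map (fun tok => pvWrap d ((PySem.Int.ofStr? tok).getD 0))

def pvSetMany (dv : List Int) (l : List Nat) : List Int :=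
  l.foldl (fun a p => a.set p 1) dv

def pvScatStep (S : Nat) (subs : List (List Int)) (p : Nat) : List (List Int) :=
  subs.set (p / S) ((subs.getD (p / S) []).set (p % S) 1)

def pvChunks (dv : List Int) (M S : Nat) : List (List Int) :=
  (List.range M).map (fun j => (dv.drop (S * j)).take S)

theorem pvSetD_neg {α : Type} (xs : List α) (i : Int) (v : α) (h1 : -(xs.length : Int) ≤ i) (h2 : i < 0) :
    PySem.List.pySetD xs i v = xs.set ((xs.length : Int) + i).toNat v := by
  simp only [PySem.List.pySetD, PySem.List.pySet?, PySem.List.pyIdx?]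
  rw [if_neg (by omega), if_pos h1]
  simp only [Option.map_some, Option.getD_some]
  congr 1
  omega

theorem length_pvSetMany (l : List Nat) (dv : List Int) :
    (pvSetMany dv l).length = dv.length := by
  induction l generalizing dv with
  | nil => rfl
  | cons p l ih => simp [pvSetMany, List.foldl_cons] at *; rw [ih]; simp

theorem pvWrap_lt (d i : Int) (hd : 0 < d) : (pvWrap d i : Int) < d := by
  have := PySem.Int.mod_lt i hd
  have := PySem.Int.mod_nonneg i hd
  unfold pvWrap; omega

theorem recon_fold (d : Int) (hd : 0 < d) :
    ∀ (l : List String) (dv : List Int), dv.length = d.toNat →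
      (∀ tok ∈ l, ((PySem.Int.ofStr? tok).any fun i => decide (-d ≤ i ∧ i < d)) = true) →
    l.foldl (fun dv tok => PySem.List.pySetD dv ((PySem.Int.ofStr? tok).getD 0) 1) dv
    = pvSetMany dv (l.map (fun tok => pvWrap d ((PySem.Int.ofStr? tok).getD 0))) := by
  intro l
  induction l with
  | nil => intro dv _ _; rfl
  | cons tok l ih =>
    intro dv hlen hv
    simp only [List.foldl_cons, List.map_cons, pvSetMany, List.foldl_cons]
    have hvt := hv tok List.mem_cons_self
    obtain ⟨i, hi, hrange⟩ : ∃ i, PySem.Int.ofStr? tok = some i ∧ (-d ≤ i ∧ i < d) := by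
      cases h : PySem.Int.ofStr? tok with
      | none => rw [h] at hvt; simp [Option.any] at hvt
      | some i => rw [h] at hvt; simp [Option.any] at hvt; exact ⟨i, rfl, hvt⟩
    rw [hi]
    simp only [Option.getD_some]
    have hset : PySem.List.pySetD dv i 1 = dv.set (pvWrap d i) 1 := by
      by_cases h0 : 0 ≤ i
      · rw [PySem.List.pySetD_of_nonneg dv 1 h0]
        congr 1
        unfold pvWrap
        rw [PySem.Int.mod_eq_emod_of_pos hd, Int.emod_eq_of_lt h0 hrange.2]
      · rw [pvSetD_neg dv i 1 (by omega) (by omega)]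
        unfold pvWrap
        have hm : PySem.Int.mod i d = i + d := by
          rw [PySem.Int.mod_eq_emod_of_pos hd]
          rw [show i % d = (i + d) % d from (Int.add_emod_right i d).symm]
          rw [Int.emod_eq_of_lt (by omega) (by omega)]
        rw [hm, hlen]
        congr 1
        omega
    rw [hset]
    have := ih (dv.set (pvWrap d i) 1) (by simp [hlen])
      (fun t ht => hv t (List.mem_cons_of_mem _ ht))
    simpa [pvSetMany] using this

theorem recon_eq (s : String) (d : Int) (hd : 0 < d)
    (hv : ∀ tok ∈ PySem.Str.split₀ s,
      ((PySem.Int.ofStr? tok).any fun i => decide (-d ≤ i ∧ i < d)) = true) :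
    reconstruct_dense_vector s d = pvSetMany (List.replicate d.toNat 0) (pvPos d s) := by
  unfold reconstruct_dense_vector
  by_cases hs : s = ""
  · subst hs
    have h0 : PySem.Str.split₀ "" = [] := by decide
    simp [pvPos, pvSetMany, h0]
  · rw [if_pos hs]
    rw [recon_fold d hd (PySem.Str.split₀ s) _ (by simp) hv]
    rfl

theorem length_recon (s : String) (d : Int) (hd : 0 < d)
    (hv : ∀ tok ∈ PySem.Str.split₀ s,
      ((PySem.Int.ofStr? tok).any fun i => decide (-d ≤ i ∧ i < d)) = true) :
    (reconstruct_dense_vector s d).length = d.toNat := by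
  rw [recon_eq s d hd hv, length_pvSetMany, List.length_replicate]

theorem pvChunks_set (M S : Nat) (hS : 0 < S) (dv : List Int) (p : Nat)
    (hlen : dv.length = M * S) (hp : p < M * S) :
    pvChunks (dv.set p 1) M S = pvScatStep S (pvChunks dv M S) p := by
  have hdiv : p / S < M := (Nat.div_lt_iff_lt_mul hS).mpr (by omega)
  have hmod := Nat.div_add_mod p S
  have hmodlt := Nat.mod_lt p hS
  have hgetD : (pvChunks dv M S).getD (p / S) [] = (dv.drop (S * (p / S))).take S := by
    rw [List.getD_eq_getElem _ [] (by simp [pvChunks, hdiv])]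
    simp [pvChunks]
  have hub : ∀ j : Nat, j < M → S * j + S ≤ M * S := by
    intro j hj
    have h := Nat.mul_le_mul_left S (show j + 1 ≤ M from by omega)
    rw [Nat.mul_succ, Nat.mul_comm S M] at h; omega
  simp only [pvChunks] at hgetD
  apply List.ext_getElem
  · simp [pvChunks, pvScatStep]
  · intro j hj hj'
    have hjM : j < M := by simp [pvChunks] at hj; omega
    simp only [pvChunks, pvScatStep, List.getElem_map, List.getElem_range, List.getElem_set]
    rw [hgetD]
    have hubj := hub j hjM
    by_cases hcase : p / S = j
    · rw [if_pos hcase]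
      subst hcase
      apply List.ext_getElem
      · simp [hlen]
      · intro k hk hk'
        have hkS : k < S := by
          simp only [List.length_take, List.length_drop, List.length_set, hlen] at hk
          omega
        rw [List.getElem_take, List.getElem_drop, List.getElem_set,
            List.getElem_set, List.getElem_take, List.getElem_drop]
        split_ifs with h1 h2 <;> first | rfl | omega
    · rw [if_neg hcase]
      apply List.ext_getElem
      · simp [hlen]
      · intro k hk hk'
        have hkS : k < S := by
          simp only [List.length_take, List.length_drop, List.length_set, hlen] at hk
          omega
        rw [List.getElem_take, List.getElem_drop, List.getElem_set,
            List.getElem_take, List.getElem_drop]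
        rw [if_neg ?hne]
        case hne =>
          intro he
          apply hcase
          rw [he, Nat.mul_add_div hS, Nat.div_eq_of_lt hkS]
          omega


theorem pvChunks_setMany (M S : Nat) (hS : 0 < S) :
    ∀ (l : List Nat) (dv : List Int), dv.length = M * S → (∀ p ∈ l, p < M * S) →
    pvChunks (pvSetMany dv l) M S = l.foldl (pvScatStep S) (pvChunks dv M S) := by
  intro l
  induction l with
  | nil => intro dv _ _; rfl
  | cons p l ih =>
    intro dv hlen hp
    simp only [pvSetMany, List.foldl_cons]
    have h1 : (dv.set p 1).length = M * S := by simp [hlen]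
    have h2 := ih (dv.set p 1) h1 (fun q hq => hp q (List.mem_cons_of_mem _ hq))
    simp only [pvSetMany] at h2
    rw [h2, pvChunks_set M S hS dv p hlen (hp p List.mem_cons_self)]

theorem pvChunks_replicate (M S : Nat) :
    pvChunks (List.replicate (M * S) 0) M S = List.replicate M (List.replicate S 0) := by
  apply List.ext_getElem
  · simp [pvChunks]
  · intro j hj hj'
    have hjM : j < M := by simp [pvChunks] at hj; omega
    have hub : S * j + S ≤ M * S := by
      have h := Nat.mul_le_mul_left S (show j + 1 ≤ M from by omega)
      rw [Nat.mul_succ, Nat.mul_comm S M] at h; omega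
    simp only [pvChunks, List.getElem_map, List.getElem_range, List.getElem_replicate]
    rw [List.drop_replicate, List.take_replicate]
    congr 1
    omega


theorem split_eq_chunks (M S : Nat) (hM : 0 < M) (hS : 0 < S) (dv : List Int)
    (hlen : dv.length = M * S) :
    split_into_subvectors dv (S : Int) = pvChunks dv M S := by
  unfold split_into_subvectors pvChunks
  rw [hlen]
  rw [PySem.List.pyRange_of_pos 0 ((M*S : Nat) : Int) (by exact_mod_cast hS)]
  rw [if_pos (by push_cast; positivity)]
  have hcount : ((((M * S : Nat) : Int) - 0 + (S:Int) - 1) / (S:Int)).toNat = M := by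
    have : (((M * S : Nat) : Int) - 0 + (S:Int) - 1) = ((M * S + (S - 1) : Nat) : Int) := by
      push_cast [Nat.cast_sub (by omega : 1 ≤ S)]; ring
    rw [this, ← Int.natCast_ediv]
    rw [show (M * S + (S-1)) = S * M + (S-1) from by ring]
    rw [Nat.mul_add_div hS, Nat.div_eq_of_lt (by omega)]
    simp
  rw [hcount, List.map_map]
  apply List.map_congr_left
  intro k hk
  simp only [Function.comp_apply]
  have h1 : (0 : Int) + (S:Int) * (k:Int) = ((S * k : Nat) : Int) := by push_cast; ring
  rw [h1, show ((S * k : Nat) : Int) + (S : Int) = ((S * k : Nat) : Int) + ((S : Nat) : Int) from rfl]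
  rw [PySem.List.slice_natCast_add]

-- B's scatter step on one in-range index equals pvScatStep at the wrapped position
theorem bstep_eq (d : Int) (M S : Nat) (hd : d = ((M * S : Nat) : Int)) (hM : 0 < M) (hS : 0 < S)
    (subs : List (List Int)) (hlen : subs.length = M) (i : Int) (h1 : -d ≤ i) (h2 : i < d) :
    PySem.List.pySetD subs (PySem.Int.floordiv i (S : Int))
      (PySem.List.pySetD
        (PySem.List.pyGetD subs (PySem.Int.floordiv i (S : Int)) [])
        (PySem.Int.mod i (S : Int)) 1)
    = pvScatStep S subs (pvWrap d i) := by
  have hd0 : (0:Int) < d := by rw [hd]; exact_mod_cast Nat.mul_pos hM hS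
  have hS0 : (0:Int) < (S:Int) := by exact_mod_cast hS
  by_cases h0 : 0 ≤ i
  · have hwi : pvWrap d i = i.toNat := by
      unfold pvWrap
      rw [PySem.Int.mod_eq_emod_of_pos hd0, Int.emod_eq_of_lt h0 h2]
    have hcast : i = ((i.toNat : Nat) : Int) := by omega
    rw [hwi, hcast, PySem.Int.floordiv_natCast, PySem.Int.mod_natCast,
        PySem.List.pyGetD_natCast, PySem.List.pySetD_natCast, PySem.List.pySetD_natCast]
    rfl
  · -- negative index: Python wraps both the subspace index and nothing else
    have hm : PySem.Int.mod i d = i + d := by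
      rw [PySem.Int.mod_eq_emod_of_pos hd0]
      rw [show i % d = (i + d) % d from (Int.add_emod_right i d).symm]
      rw [Int.emod_eq_of_lt (by omega) (by omega)]
    have hpd : ((pvWrap d i : Nat) : Int) = i + d := by
      unfold pvWrap; omega
    set p : Nat := pvWrap d i with hpdef
    have hip : i = (p : Int) - (M : Int) * (S : Int) := by
      have : ((M * S : Nat) : Int) = (M : Int) * (S : Int) := by push_cast; ring
      omega
    have hpMS : p < M * S := by
      have h2' : (p : Int) < ((M * S : Nat) : Int) := by rw [← hd]; omega
      exact_mod_cast h2'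
    have hdivlt : p / S < M := (Nat.div_lt_iff_lt_mul hS).mpr (by omega)
    have hj : PySem.Int.floordiv i (S : Int) = ((p / S : Nat) : Int) - (M : Int) := by
      rw [PySem.Int.floordiv_eq_ediv_of_pos hS0, hip]
      rw [show ((p:Int) - (M:Int) * (S:Int)) = (p:Int) + (-(M:Int)) * (S:Int) from by ring]
      rw [Int.add_mul_ediv_right _ _ (by omega : (S:Int) ≠ 0)]
      rw [Int.natCast_ediv]
      ring
    have hmodi : PySem.Int.mod i (S : Int) = ((p % S : Nat) : Int) := by
      rw [PySem.Int.mod_eq_emod_of_pos hS0, hip]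
      rw [show ((p:Int) - (M:Int) * (S:Int)) = (p:Int) + (S:Int) * (-(M:Int)) from by ring]
      rw [Int.add_mul_emod_self_left]
      exact_mod_cast (Int.natCast_mod p S).symm
    have hkpos : 0 < M - p / S := Nat.sub_pos_of_lt hdivlt
    have hkle : M - p / S ≤ subs.length := hlen ▸ Nat.sub_le M (p / S)
    have hjneg : ((p / S : Nat) : Int) - (M : Int) = -(((M - p / S : Nat)) : Int) := by
      have : ((M - p / S : Nat) : Int) = (M : Int) - ((p / S : Nat) : Int) := by
        push_cast [Nat.cast_sub (le_of_lt hdivlt)]; ring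
      omega
    rw [hj, hmodi, hjneg]
    rw [PySem.List.pyGetD_neg_natCast subs (M - p / S) ([]) hkpos hkle]
    rw [pvSetD_neg subs _ _ (by rw [hlen]; omega) (by omega)]
    rw [PySem.List.pySetD_natCast]
    unfold pvScatStep
    have hidx : ((subs.length : Int) + -(((M - p / S : Nat)) : Int)).toNat = p / S := by
      have : ((M - p / S : Nat) : Int) = (M : Int) - ((p / S : Nat) : Int) := by
        push_cast [Nat.cast_sub (le_of_lt hdivlt)]; ring
      omega
    have hidx2 : subs.length - (M - p / S) = p / S := by omega
    simp only [hidx, hidx2]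
    rw [List.getD_eq_getElem subs [] (by omega)]

theorem scatstep_len (S : Nat) (subs : List (List Int)) (p : Nat) :
    (pvScatStep S subs p).length = subs.length := by
  simp [pvScatStep]

theorem bfold_eq (d : Int) (M S : Nat) (hd : d = ((M * S : Nat) : Int)) (hM : 0 < M) (hS : 0 < S) :
    ∀ (l : List String) (subs : List (List Int)), subs.length = M →
      (∀ tok ∈ l, ((PySem.Int.ofStr? tok).any fun i => decide (-d ≤ i ∧ i < d)) = true) →
    l.foldl
      (fun subs tok =>
        let idx := (PySem.Int.ofStr? tok).getD 0
        PySem.List.pySetD subs (PySem.Int.floordiv idx (S : Int))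
          (PySem.List.pySetD
            (PySem.List.pyGetD subs (PySem.Int.floordiv idx (S : Int)) [])
            (PySem.Int.mod idx (S : Int)) 1))
      subs
    = (l.map (fun tok => pvWrap d ((PySem.Int.ofStr? tok).getD 0))).foldl (pvScatStep S) subs := by
  intro l
  induction l with
  | nil => intro subs _ _; rfl
  | cons tok l ih =>
    intro subs hlen hv
    simp only [List.foldl_cons, List.map_cons]
    have hvt := hv tok List.mem_cons_self
    obtain ⟨i, hi, hrange⟩ : ∃ i, PySem.Int.ofStr? tok = some i ∧ (-d ≤ i ∧ i < d) := by
      cases h : PySem.Int.ofStr? tok with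
      | none => rw [h] at hvt; simp [Option.any] at hvt
      | some i => rw [h] at hvt; simp [Option.any] at hvt; exact ⟨i, rfl, hvt⟩
    rw [hi]
    simp only [Option.getD_some]
    rw [bstep_eq d M S hd hM hS subs hlen i hrange.1 hrange.2]
    exact ih _ (by rw [scatstep_len, hlen]) (fun t ht => hv t (List.mem_cons_of_mem _ ht))

theorem map_getD_range (M : Nat) (g : List (List (List Int))) (h : g.length = M) :
    (List.range M).map (fun j => g.getD j []) = g := by
  apply List.ext_getElem
  · simp [h]
  · intro i h1 h2
    simp only [List.getElem_map, List.getElem_range]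
    rw [List.getD_eq_getElem g [] (by simp [h] at h1 ⊢; omega)]

theorem pyfold_append (M : Nat) (sv : List (List Int)) (hsv : sv.length = M) :
    ∀ (b a : Nat) (g : List (List (List Int))), g.length = M → M ≤ a + b →
    (PySem.List.pyRange (a : Int) (M : Int) 1).foldl
      (fun g j =>
        PySem.List.pySetD g j
          (PySem.List.pyGetD g j [] ++ [PySem.List.pyGetD sv j []]))
      g
    = g.take a ++ List.zipWith (fun x y => x ++ [y]) (g.drop a) (sv.drop a) := by
  intro b
  induction b with
  | zero =>
    intro a g hg hab
    rw [PySem.List.pyRange_one_eq_nil (by exact_mod_cast (by omega : M ≤ a))]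
    rw [List.drop_eq_nil_of_le (by omega), List.take_of_length_le (by omega)]
    simp
  | succ b ih =>
    intro a g hg hab
    by_cases haM : M ≤ a
    · rw [PySem.List.pyRange_one_eq_nil (by exact_mod_cast haM)]
      rw [List.drop_eq_nil_of_le (by omega), List.take_of_length_le (by omega)]
      simp
    · have haM' : a < M := by omega
      rw [PySem.List.pyRange_one_cons (by exact_mod_cast haM')]
      rw [List.foldl_cons]
      rw [PySem.List.pyGetD_natCast, PySem.List.pyGetD_natCast, PySem.List.pySetD_natCast]
      rw [show ((a:Int) + 1) = ((a+1 : Nat) : Int) from by push_cast; ring]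
      rw [ih (a+1) _ (by simp [hg]) (by omega)]
      have hga : a < g.length := by omega
      have hsa : a < sv.length := by omega
      rw [List.set_eq_take_append_cons_drop, if_pos hga]
      have htl : (g.take a).length = a := by simp; omega
      have h1 : ((g.take a ++ (g.getD a [] ++ [sv.getD a []]) :: g.drop (a+1)).take (a+1))
          = g.take a ++ [g.getD a [] ++ [sv.getD a []]] := by
        rw [show a + 1 = (g.take a).length + 1 from by omega]
        rw [List.take_append]
        simp
      have h2 : ((g.take a ++ (g.getD a [] ++ [sv.getD a []]) :: g.drop (a+1)).drop (a+1))
          = g.drop (a+1) := by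
        rw [show a + 1 = (g.take a).length + 1 from by omega]
        rw [List.drop_append]
        simp
      rw [h1, h2]
      rw [List.drop_eq_getElem_cons hga, List.drop_eq_getElem_cons hsa]
      rw [List.zipWith_cons_cons]
      rw [List.getD_eq_getElem g [] hga, List.getD_eq_getElem sv [] hsa]
      simp

theorem fold_append_transpose (M : Nat) :
    ∀ (cs : List (List (List Int))) (g : List (List (List Int))), g.length = M →
      (∀ c ∈ cs, c.length = M) →
    cs.foldl (fun g c => List.zipWith (fun x y => x ++ [y]) g c) g
    = (List.range M).map (fun j => g.getD j [] ++ cs.map (fun c => c.getD j [])) := by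
  intro cs
  induction cs with
  | nil =>
    intro g hg _
    simp only [List.foldl_nil, List.map_nil, List.append_nil]
    exact (map_getD_range M g hg).symm
  | cons c cs ih =>
    intro g hg hc
    have hcM : c.length = M := hc c List.mem_cons_self
    rw [List.foldl_cons, ih _ (by simp [hg, hcM]) (fun x hx => hc x (List.mem_cons_of_mem _ hx))]
    apply List.map_congr_left
    intro j hj
    have hjM : j < M := List.mem_range.mp hj
    have hz : (List.zipWith (fun x y => x ++ [y]) g c).getD j []
        = g.getD j [] ++ [c.getD j []] := by
      rw [List.getD_eq_getElem _ _ (by simp [hg, hcM]; omega)]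
      rw [List.getElem_zipWith]
      rw [List.getD_eq_getElem g [] (by omega), List.getD_eq_getElem c [] (by omega)]
    rw [hz]
    simp


theorem make_subvector_groups_witness :
    Dom_make_subvector_groups (pvWitness_make_subvector_groups.1) (pvWitness_make_subvector_groups.2.1) (pvWitness_make_subvector_groups.2.2) ∧
    Pre_make_subvector_groups (pvWitness_make_subvector_groups.1) (pvWitness_make_subvector_groups.2.1) (pvWitness_make_subvector_groups.2.2) := by
  decide


theorem scat_preserve (S : Nat) : ∀ (l : List Nat) (subs : List (List Int)),
    (l.foldl (pvScatStep S) subs).length = subs.length := by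
  intro l
  induction l with
  | nil => intro subs; rfl
  | cons p l ih => intro subs; rw [List.foldl_cons, ih]; simp [pvScatStep]

theorem recon_no_tokens (s : String) (d : Int) (h : PySem.Str.split₀ s = []) :
    reconstruct_dense_vector s d = List.replicate d.toNat 0 := by
  unfold reconstruct_dense_vector
  split
  · rw [h]; rfl
  · rfl

theorem pvPos_lt (d : Int) (M S : Nat) (hd : d = ((M * S : Nat) : Int)) (hd0 : 0 < d)
    (s : String) : ∀ p ∈ pvPos d s, p < M * S := by
  intro p hp
  simp only [pvPos, List.mem_map] at hp
  obtain ⟨tok, _, rfl⟩ := hp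
  have := pvWrap_lt d ((PySem.Int.ofStr? tok).getD 0) hd0
  omega

theorem chunk_chain (d : Int) (M S : Nat) (hM : 0 < M) (hS : 0 < S)
    (hd : d = ((M * S : Nat) : Int)) (s : String)
    (hv : ∀ tok ∈ PySem.Str.split₀ s,
      ((PySem.Int.ofStr? tok).any fun i => decide (-d ≤ i ∧ i < d)) = true) :
    split_into_subvectors (reconstruct_dense_vector s d) (S : Int)
    = (pvPos d s).foldl (pvScatStep S) (List.replicate M (List.replicate S 0)) := by
  have hd0 : 0 < d := by rw [hd]; exact_mod_cast Nat.mul_pos hM hS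
  have hdt : d.toNat = M * S := by omega
  rw [recon_eq s d hd0 hv, hdt]
  rw [split_eq_chunks M S hM hS _ (by rw [length_pvSetMany, List.length_replicate])]
  rw [pvChunks_setMany M S hS _ _ (by simp) (pvPos_lt d M S hd hd0 s)]
  rw [pvChunks_replicate]

theorem foldA_eq (d : Int) (M S : Nat) (hM : 0 < M) (hS : 0 < S)
    (hd : d = ((M * S : Nat) : Int)) :
    ∀ (l : List String) (g : List (List (List Int))), g.length = M →
      (∀ s ∈ l, ∀ tok ∈ PySem.Str.split₀ s,
        ((PySem.Int.ofStr? tok).any fun i => decide (-d ≤ i ∧ i < d)) = true) →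
    l.foldl (fun groups s =>
      (PySem.List.pyRange 0 ((M : Nat) : Int) 1).foldl
        (fun g j => PySem.List.pySetD g j
          (PySem.List.pyGetD g j [] ++
            [PySem.List.pyGetD
              (split_into_subvectors (reconstruct_dense_vector s d) (S : Int)) j []]))
        groups) g
    = l.foldl (fun groups s =>
        List.zipWith (fun x y => x ++ [y]) groups
          ((pvPos d s).foldl (pvScatStep S) (List.replicate M (List.replicate S 0)))) g := by
  intro l
  induction l with
  | nil => intro g _ _; rfl
  | cons s l ih =>
    intro g hg hv
    rw [List.foldl_cons, List.foldl_cons]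
    have hvs := hv s List.mem_cons_self
    have hC := chunk_chain d M S hM hS hd s hvs
    rw [hC]
    have hClen : ((pvPos d s).foldl (pvScatStep S)
        (List.replicate M (List.replicate S 0))).length = M := by
      rw [scat_preserve, List.length_replicate]
    have hp := pyfold_append M _ hClen M 0 g hg (by omega)
    simp only [Nat.cast_zero, List.take_zero, List.drop_zero, List.nil_append] at hp
    rw [hp]
    exact ih _ (by simp [hg, hClen]) (fun t ht => hv t (List.mem_cons_of_mem _ ht))

-- ===== VERDICT (by name: the statement is the Claim_ definition above) =====
theorem make_subvector_groups_spec : Claim_equal_make_subvector_groups := by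
  intro sv m d _ hpre
  obtain ⟨hne, hd1, hdvd, hcase⟩ := hpre
  unfold Spec_make_subvector_groups
  obtain ⟨s0, rest, rfl⟩ : ∃ s0 rest, sv = s0 :: rest := by
    cases sv with
    | nil => exact absurd rfl hne
    | cons a l => exact ⟨a, l, rfl⟩
  have hmod : PySem.Int.mod d m = 0 := (PySem.Int.mod_eq_zero_iff_dvd d m).mpr hdvd
  rcases hcase with ⟨hm, htok⟩ | ⟨hm, hemp⟩
  · -- 1 ≤ m : the real case
    obtain ⟨k, hk⟩ := hdvd
    have hk0 : 0 < k := by nlinarith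
    set M := m.toNat with hMdef
    set S := k.toNat with hSdef
    have hmM : m = (M : Int) := by omega
    have hkS : k = (S : Int) := by omega
    have hMpos : 0 < M := by omega
    have hSpos : 0 < S := by omega
    have hdMS : d = ((M * S : Nat) : Int) := by rw [hk, hmM, hkS]; push_cast; ring
    have hd0 : 0 < d := by omega
    have hlen0 : (reconstruct_dense_vector s0 d).length = M * S := by
      rw [length_recon s0 d hd0 (htok s0 List.mem_cons_self)]
      omega
    have hfdiv : PySem.Int.floordiv ((M * S : Nat) : Int) m = (S : Int) := by
      rw [hmM, PySem.Int.floordiv_natCast, Nat.mul_div_cancel_left S hMpos]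
    have hfmod : PySem.Int.mod ((M * S : Nat) : Int) m = 0 := by
      rw [hmM, PySem.Int.mod_natCast, Nat.mul_mod_right]
      rfl
    simp only [make_subvector_groups, make_subvector_groups_alt, List.map_cons]
    have hfirst : PySem.List.pyGetD
        (reconstruct_dense_vector s0 d :: rest.map (fun s => reconstruct_dense_vector s d)) 0 []
        = reconstruct_dense_vector s0 d := by
      simp [PySem.List.pyGetD, PySem.List.pyGet?, PySem.List.pyIdx?]
    rw [hfirst, hlen0, hfdiv, hfmod, hmod]
    simp only [ne_eq, not_true_eq_false, if_false]
    have hsub : PySem.Int.floordiv d m = (S : Int) := by rw [hdMS]; exact hfdiv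
    rw [hsub]
    rw [show (reconstruct_dense_vector s0 d ::
          List.map (fun vec_str => reconstruct_dense_vector vec_str d) rest)
        = (s0 :: rest).map (fun s => reconstruct_dense_vector s d) from rfl]
    rw [List.foldl_map]
    rw [hmM]
    have hinitlen : ((PySem.List.pyRange 0 ((M : Nat) : Int) 1).map
        (fun _ => ([] : List (List Int)))).length = M := by
      simp [PySem.List.length_pyRange_one]
    rw [foldA_eq d M S hMpos hSpos hdMS (s0 :: rest) _ hinitlen htok]
    rw [← List.foldl_map (f := fun s => (pvPos d s).foldl (pvScatStep S)
        (List.replicate M (List.replicate S 0)))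
      (g := fun groups c => List.zipWith (fun x y => x ++ [y]) groups c)]
    rw [fold_append_transpose M _ _ hinitlen (by
      intro c hc
      simp only [List.mem_map] at hc
      obtain ⟨s, _, rfl⟩ := hc
      rw [scat_preserve, List.length_replicate])]
    -- B side: the per-vector init is a length-M list of zero subvectors
    have hinitB : ((PySem.List.pyRange 0 ((M : Nat) : Int) 1).map
        (fun _ => List.replicate ((S : Int)).toNat (0 : Int)))
        = List.replicate M (List.replicate S (0 : Int)) := by
      rw [List.map_const', PySem.List.length_pyRange_one]
      simp
    rw [hinitB]
    have hper : ∀ s ∈ s0 :: rest, (PySem.Str.split₀ s).foldl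
        (fun subs tok =>
          let idx := (PySem.Int.ofStr? tok).getD 0
          PySem.List.pySetD subs (PySem.Int.floordiv idx (S : Int))
            (PySem.List.pySetD
              (PySem.List.pyGetD subs (PySem.Int.floordiv idx (S : Int)) [])
              (PySem.Int.mod idx (S : Int)) 1))
        (List.replicate M (List.replicate S 0))
      = (pvPos d s).foldl (pvScatStep S) (List.replicate M (List.replicate S 0)) := by
      intro s hs
      rw [bfold_eq d M S hdMS hMpos hSpos _ _ (by simp) (htok s hs)]
      rfl
    rw [hper s0 List.mem_cons_self,
        List.map_congr_left (fun s hs => hper s (List.mem_cons_of_mem _ hs))]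
    rw [PySem.List.pyRange_one, List.map_map,
        show (((M : Nat) : Int) - 0).toNat = M from by omega, List.map_map]
    apply List.map_congr_left
    intro j hj
    have hj' : j < M := List.mem_range.mp hj
    simp only [Function.comp_apply, zero_add, PySem.List.pyGetD_natCast, List.map_cons,
      List.map_map]
    rw [List.getD_eq_getElem _ _ (by simpa using hj')]
    simp
  · -- m ≤ -1 : no tokens anywhere, both sides are []
    have hfold_id : ∀ (l : List (List Int)) (g : List (List (List Int))),
        l.foldl (fun g _ => g) g = g := by
      intro l
      induction l with
      | nil => intro g; rfl
      | cons x l ih => intro g; rw [List.foldl_cons]; exact ih g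
    simp only [make_subvector_groups, make_subvector_groups_alt, List.map_cons]
    rw [recon_no_tokens s0 d (hemp s0 List.mem_cons_self)]
    have hfirst : PySem.List.pyGetD
        (List.replicate d.toNat 0 :: rest.map (fun s => reconstruct_dense_vector s d)) 0 []
        = List.replicate d.toNat 0 := by
      simp [PySem.List.pyGetD, PySem.List.pyGet?, PySem.List.pyIdx?]
    rw [hfirst, List.length_replicate]
    rw [show ((d.toNat : Nat) : Int) = d from by omega]
    rw [hmod]
    simp only [ne_eq, not_true_eq_false, if_false]
    rw [PySem.List.pyRange_one_eq_nil (show m ≤ 0 from by omega)]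
    simp only [List.map_nil, List.foldl_nil]
    exact hfold_id _ []
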